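-- pv_equiv track=rewrite | github.com/arunraja-hub/APPuSSA | lexical_enc_dec_attn.py | preprocess_sentence
-- ===== SOURCE A (Python) =====
-- PUNCTUATION_MARKS = [
--   '<FULL_STOP>', '<COMMA>', '<QUESTION_MARK>', '<EXCLAMATION_MARK>', '<DOTS>'
-- ]
--
-- def preprocess_sentence(sentence):
--   output_words = []
--   output_punctuation_marks = []
--
--   id_ = sentence.split()[0]
--   words = sentence.split()[1:]
--   for (word, punctuation_mark) in zip(words, words[1:] + [None]):
--     if word in PUNCTUATION_MARKS:
--       continue
--
--     if punctuation_mark not in PUNCTUATION_MARKS: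
--       punctuation_mark = "<SPACE>"
--
--     output_words.append(word)
--     output_punctuation_marks.append(punctuation_mark)
--
--   # return [id_,
--   #     " ".join(output_words),
--   #     " ".join(output_punctuation_marks)
--   # ]
--
--
--   return [id_,
--       "<start> %s <end>" % " ".join(output_words),
--       "<start> %s <end>" % " ".join(output_punctuation_marks)
--   ]
-- ===== SOURCE B (Python) =====
-- PUNCTUATION_MARKS = [
--   '<FULL_STOP>', '<COMMA>', '<QUESTION_MARK>', '<EXCLAMATION_MARK>', '<DOTS>'
-- ]
--
-- def preprocess_sentence(sentence):
--   # One split; walk tokens left-to-right with a flag instead of zipping with a lookahead list.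
--   tokens = sentence.split()
--   id_ = tokens[0]
--   output_words = []
--   output_punctuation_marks = []
--   prev_was_word = False
--   for tok in tokens[1:]:
--     if tok in PUNCTUATION_MARKS:
--       if prev_was_word:
--         output_punctuation_marks[-1] = tok
--       prev_was_word = False
--     else:
--       output_words.append(tok)
--       output_punctuation_marks.append("<SPACE>")
--       prev_was_word = True
--   return [id_,
--       "<start> %s <end>" % " ".join(output_words),
--       "<start> %s <end>" % " ".join(output_punctuation_marks)
--   ]
-- ===== Notes on version B (the rewrite author's own statement) =====
-- stated objective: simpler
-- what changed: B splits the sentence once and does a single forward pass with a prev-was-word flag (overwriting the last punctuation slot when a mark follows a word), instead of A's double split and zip of the word list with a shifted copy for lookahead.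
import Mathlib
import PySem

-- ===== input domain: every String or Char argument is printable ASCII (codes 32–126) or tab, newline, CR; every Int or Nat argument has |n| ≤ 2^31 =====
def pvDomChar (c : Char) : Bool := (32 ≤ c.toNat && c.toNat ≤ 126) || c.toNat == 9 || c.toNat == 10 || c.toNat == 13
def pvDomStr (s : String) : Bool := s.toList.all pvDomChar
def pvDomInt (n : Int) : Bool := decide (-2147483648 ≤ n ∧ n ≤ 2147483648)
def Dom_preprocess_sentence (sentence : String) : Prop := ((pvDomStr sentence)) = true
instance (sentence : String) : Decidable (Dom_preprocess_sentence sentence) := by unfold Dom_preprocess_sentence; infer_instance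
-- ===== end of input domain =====

-- B replaces A's zip-with-shifted-copy lookahead by a single forward pass with a
-- prev-was-word flag (objective: simpler); return value only, no mutation involved.

def PUNCTUATION_MARKS : List String :=
  ["<FULL_STOP>", "<COMMA>", "<QUESTION_MARK>", "<EXCLAMATION_MARK>", "<DOTS>"]

-- default rule for the loop's punctuation_mark: 'if punctuation_mark not in PUNCTUATION_MARKS: punctuation_mark = "<SPACE>"' (None is never in the list)
def pvDefaultMark (o : Option String) : String :=
  match o with
  | some p => if p ∈ PUNCTUATION_MARKS then p else "<SPACE>"
  | none => "<SPACE>"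

-- ===== PORT A =====
-- literal port: id_ = split()[0] (empty split = IndexError, excluded by Pre_),
-- words = split()[1:], loop over zip(words, words[1:] + [None]).
def preprocess_sentence (sentence : String) : List String :=
  match PySem.Str.split₀ sentence with
  | [] => []  -- Python raises IndexError here; excluded by Pre_
  | id_ :: _ =>
    let words := (PySem.Str.split₀ sentence).drop 1
    let pairs := words.zip (((words.drop 1).map some) ++ [none])
    let st := pairs.foldl (fun (st : List String × List String) wp =>
      if wp.1 ∈ PUNCTUATION_MARKS then st
      else (st.1 ++ [wp.1], st.2 ++ [pvDefaultMark wp.2])) ([], [])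
    [id_,
     "<start> " ++ PySem.Str.join " " st.1 ++ " <end>",
     "<start> " ++ PySem.Str.join " " st.2 ++ " <end>"]

-- ===== PORT B =====
-- literal port of Source B: one split, single pass with a prev_was_word flag;
-- output_punctuation_marks[-1] = tok becomes dropLast ++ [tok].
def preprocess_sentence_alt (sentence : String) : List String :=
  match PySem.Str.split₀ sentence with
  | [] => []  -- tokens[0] raises IndexError in Python; excluded by Pre_
  | id_ :: toks =>
    let st := toks.foldl (fun (st : List String × List String × Bool) tok =>
      if tok ∈ PUNCTUATION_MARKS then
        (st.1, (if st.2.2 then st.2.1.dropLast ++ [tok] else st.2.1), false)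
      else
        (st.1 ++ [tok], st.2.1 ++ ["<SPACE>"], true)) ([], [], false)
    [id_,
     "<start> " ++ PySem.Str.join " " st.1 ++ " <end>",
     "<start> " ++ PySem.Str.join " " st.2.1 ++ " <end>"]

-- ===== PRECONDITION & SPEC =====
-- Pre_ excludes exactly the whitespace-only sentences, on which A's sentence.split()[0] raises IndexError.
def Pre_preprocess_sentence (sentence : String) : Prop := PySem.Str.split₀ sentence ≠ []
instance (sentence : String) : Decidable (Pre_preprocess_sentence sentence) := by unfold Pre_preprocess_sentence; infer_instance

def pvWitness_preprocess_sentence : String := "17 Hello <COMMA> world <FULL_STOP>"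

def Spec_preprocess_sentence (sentence : String) (out : List String) : Prop := out = preprocess_sentence_alt sentence
instance (sentence : String) (out : List String) : Decidable (Spec_preprocess_sentence sentence out) := by unfold Spec_preprocess_sentence; infer_instance

-- ===== CLAIM (what is proved, stated in full; the proofs are below) =====
def Claim_equal_preprocess_sentence : Prop := ∀ (sentence : String), Dom_preprocess_sentence sentence → Pre_preprocess_sentence sentence → Spec_preprocess_sentence sentence (preprocess_sentence sentence)

-- ===== LEMMAS AND PROOFS =====

-- the punctuation mark A pairs with the word at the head of the remaining tokens
-- (also: the mark B's flag=true state is about to write)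
def pvLook : List String → String
  | [] => "<SPACE>"
  | p :: _ => if p ∈ PUNCTUATION_MARKS then p else "<SPACE>"

theorem pvLook_eq (rest : List String) : pvDefaultMark rest.head? = pvLook rest := by
  cases rest <;> rfl

-- common recursive characterisation of the (words, marks) pair both loops build
def pvSpecWP : List String → List String × List String
  | [] => ([], [])
  | w :: rest =>
    let t := pvSpecWP rest
    if w ∈ PUNCTUATION_MARKS then t else (w :: t.1, pvLook rest :: t.2)

theorem pvZip_cons (w : String) (rest : List String) :
    (w :: rest).zip ((((w :: rest).drop 1).map some) ++ [none])
      = (w, rest.head?) :: rest.zip (((rest.drop 1).map some) ++ [none]) := by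
  cases rest with
  | nil => simp
  | cons r rs => simp

theorem pvFoldA (ws : List String) : ∀ (ow op : List String),
    List.foldl (fun (st : List String × List String) wp =>
      if wp.1 ∈ PUNCTUATION_MARKS then st
      else (st.1 ++ [wp.1], st.2 ++ [pvDefaultMark wp.2])) (ow, op)
      (ws.zip (((ws.drop 1).map some) ++ [none]))
      = (ow ++ (pvSpecWP ws).1, op ++ (pvSpecWP ws).2) := by
  induction ws with
  | nil => intro ow op; simp [pvSpecWP]
  | cons w rest ih =>
    intro ow op
    rw [pvZip_cons, List.foldl_cons]
    by_cases hw : w ∈ PUNCTUATION_MARKS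
    · rw [if_pos hw, ih, pvSpecWP]
      simp [hw]
    · rw [if_neg hw, ih, pvLook_eq, pvSpecWP]
      simp [hw]

-- B's loop body, named for the induction
def pvStepB (st : List String × List String × Bool) (tok : String) : List String × List String × Bool :=
  if tok ∈ PUNCTUATION_MARKS then
    (st.1, (if st.2.2 then st.2.1.dropLast ++ [tok] else st.2.1), false)
  else
    (st.1 ++ [tok], st.2.1 ++ ["<SPACE>"], true)

theorem pvFoldB (ws : List String) :
    (∀ (ow op : List String),
      ((ws.foldl pvStepB (ow, op, false)).1, (ws.foldl pvStepB (ow, op, false)).2.1)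
        = (ow ++ (pvSpecWP ws).1, op ++ (pvSpecWP ws).2)) ∧
    (∀ (ow op : List String),
      ((ws.foldl pvStepB (ow, op ++ ["<SPACE>"], true)).1,
       (ws.foldl pvStepB (ow, op ++ ["<SPACE>"], true)).2.1)
        = (ow ++ (pvSpecWP ws).1, op ++ [pvLook ws] ++ (pvSpecWP ws).2)) := by
  induction ws with
  | nil => exact ⟨fun ow op => by simp [pvSpecWP], fun ow op => by simp [pvSpecWP, pvLook]⟩
  | cons w rest ih =>
    constructor
    · intro ow op
      by_cases hw : w ∈ PUNCTUATION_MARKS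
      · simp only [List.foldl_cons, pvStepB, if_pos hw, pvSpecWP]
        simpa using ih.1 ow op
      · simp only [List.foldl_cons, pvStepB, if_neg hw, pvSpecWP]
        have := ih.2 (ow ++ [w]) op
        simp only [List.append_assoc] at this ⊢
        rw [this]
        cases rest with
        | nil => simp [pvLook]
        | cons a b => simp [pvLook]
    · intro ow op
      by_cases hw : w ∈ PUNCTUATION_MARKS
      · simp only [List.foldl_cons, pvStepB, if_pos hw, if_true, List.dropLast_concat]
        have h1 := ih.1 ow (op ++ [w])
        simp only [List.append_assoc] at h1 ⊢
        rw [h1]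
        simp [pvSpecWP, pvLook, hw]
      · simp only [List.foldl_cons, pvStepB, if_neg hw]
        have := ih.2 (ow ++ [w]) (op ++ ["<SPACE>"])
        simp only [List.append_assoc] at this ⊢
        rw [this]
        cases rest with
        | nil => simp [pvSpecWP, pvLook, hw]
        | cons a b => simp [pvSpecWP, pvLook, hw]

-- ===== VERDICT (by name: the statement is the Claim_ definition above) =====
theorem preprocess_sentence_spec : Claim_equal_preprocess_sentence := by
  intro sentence _ _
  unfold Spec_preprocess_sentence preprocess_sentence preprocess_sentence_alt
  cases h : PySem.Str.split₀ sentence with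
  | nil => rfl
  | cons id_ toks =>
    have e : (List.foldl (fun (st : List String × List String × Bool) tok =>
        if tok ∈ PUNCTUATION_MARKS then
          (st.1, (if st.2.2 then st.2.1.dropLast ++ [tok] else st.2.1), false)
        else
          (st.1 ++ [tok], st.2.1 ++ ["<SPACE>"], true)) ([], [], false) toks)
        = List.foldl pvStepB ([], [], false) toks := rfl
    simp only [List.drop_succ_cons, List.drop_zero]
    rw [pvFoldA toks [] [], e]
    have hb := (pvFoldB toks).1 [] []
    have h1 : (toks.foldl pvStepB ([], [], false)).1 = (pvSpecWP toks).1 := by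
      have := congrArg Prod.fst hb; simpa using this
    have h2 : (toks.foldl pvStepB ([], [], false)).2.1 = (pvSpecWP toks).2 := by
      have := congrArg Prod.snd hb; simpa using this
    rw [h1, h2]
    simp
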